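-- pv_equiv track=rewrite | github.com/dungdm93/code-gym | codechef/AVGMAT.py | do_logic
-- ===== SOURCE A (Python) =====
-- def do_logic(n, m, houses):
--     no_of_house = len(houses)
--     dist = [0] * (n + m)
--     for i in range(no_of_house):
--         h1 = houses[i]
--         for j in range(i + 1, no_of_house):
--             h2 = houses[j]
--             d = abs(h1[0] - h2[0]) + abs(h1[1] - h2[1])
--             dist[d] = dist[d] + 1
--     return dist
-- ===== SOURCE B (Python) =====
-- def do_logic(n, m, houses):
--     dist = [0] * (n + m)
--     if len(houses) < 2:
--         return dist
--     cnt = {}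
--     for h in houses:
--         p = (h[0], h[1])
--         cnt[p] = cnt.get(p, 0) + 1
--     pts = list(cnt.items())
--     for i, ((x1, y1), c1) in enumerate(pts):
--         if c1 > 1:
--             dist[0] += c1 * (c1 - 1) // 2
--         for (x2, y2), c2 in pts[i + 1:]:
--             dist[abs(x1 - x2) + abs(y1 - y2)] += c1 * c2
--     return dist
-- ===== Notes on version B (the rewrite author's own statement) =====
-- stated objective: faster
-- what changed: B returns the zero histogram immediately when there are fewer than two houses, and otherwise collapses the houses into a coordinate->multiplicity counter dict and runs the pairwise loop over the distinct points only, weighting each bucket increment by the product of multiplicities (plus c*(c-1)//2 at distance 0 per duplicated point), instead of A's triangular index loop over all house pairs.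
import Mathlib
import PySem

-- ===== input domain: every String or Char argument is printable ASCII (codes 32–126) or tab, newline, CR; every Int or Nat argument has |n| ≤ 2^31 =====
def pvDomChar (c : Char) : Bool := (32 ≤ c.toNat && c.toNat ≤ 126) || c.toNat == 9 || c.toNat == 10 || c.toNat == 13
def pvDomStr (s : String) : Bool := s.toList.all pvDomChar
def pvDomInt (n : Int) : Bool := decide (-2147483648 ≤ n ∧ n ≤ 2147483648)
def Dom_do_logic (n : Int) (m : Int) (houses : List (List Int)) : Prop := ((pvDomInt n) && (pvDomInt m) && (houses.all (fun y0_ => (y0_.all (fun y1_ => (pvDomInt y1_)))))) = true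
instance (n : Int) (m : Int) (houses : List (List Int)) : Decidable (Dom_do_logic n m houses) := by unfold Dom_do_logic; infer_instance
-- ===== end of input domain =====

-- B replaces A's triangular index loop over all house pairs by an early zero-histogram return when
-- there are fewer than two houses and otherwise a coordinate→multiplicity counter dict with a
-- pairwise loop over the DISTINCT coordinates only, weighted by multiplicity products.

-- ===== PORT A =====
def do_logic (n : Int) (m : Int) (houses : List (List Int)) : List Int :=
  let no_of_house : Int := (houses.length : Int)
  let dist : List Int := PySem.List.pyRepeat [0] (n + m)
  (PySem.List.pyRange 0 no_of_house 1).foldl (fun dist i =>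
    let h1 := PySem.List.pyGetD houses i []
    (PySem.List.pyRange (i + 1) no_of_house 1).foldl (fun dist j =>
      let h2 := PySem.List.pyGetD houses j []
      let d := |PySem.List.pyGetD h1 0 0 - PySem.List.pyGetD h2 0 0| +
               |PySem.List.pyGetD h1 1 0 - PySem.List.pyGetD h2 1 0|
      PySem.List.pySetD dist d (PySem.List.pyGetD dist d 0 + 1)) dist) dist

-- ===== PORT B =====
def do_logic_alt (n : Int) (m : Int) (houses : List (List Int)) : List Int :=
  let dist : List Int := PySem.List.pyRepeat [0] (n + m)
  if (houses.length : Int) < 2 then dist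
  else
    let cnt : PySem.Dict (Int × Int) Int :=
      houses.foldl (fun cnt h =>
        let p := (PySem.List.pyGetD h 0 0, PySem.List.pyGetD h 1 0)
        cnt.insert p (cnt.getD p 0 + 1)) PySem.Dict.empty
    let pts := cnt.items
    (PySem.List.enumerate pts 0).foldl (fun dist e =>
      let dist := if 1 < e.2.2 then
          PySem.List.pySetD dist 0 (PySem.List.pyGetD dist 0 0 +
            PySem.Int.floordiv (e.2.2 * (e.2.2 - 1)) 2)
        else dist
      (PySem.List.slice pts (some (e.1 + 1)) none).foldl (fun dist q =>
        let d := |e.2.1.1 - q.1.1| + |e.2.1.2 - q.1.2|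
        PySem.List.pySetD dist d (PySem.List.pyGetD dist d 0 + e.2.2 * q.2)) dist) dist

-- ===== PRECONDITION & SPEC =====
-- helpers used by Pre_: the point of a row, L1 distance, and the list of i<j pairs of a list
def pvProj (h : List Int) : Int × Int := (PySem.List.pyGetD h 0 0, PySem.List.pyGetD h 1 0)
def pvDistP (p q : Int × Int) : Int := |p.1 - q.1| + |p.2 - q.2|
def pvAllPairs {α : Type} : List α → List (α × α)
  | [] => []
  | x :: r => r.map (fun y => (x, y)) ++ pvAllPairs r

-- Pre_ = exactly the inputs on which the Python A returns normally: when at least two houses exist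
-- every row is indexed by some pair, so rows must be long enough (A raises IndexError otherwise;
-- with 0 or 1 houses no row is touched and Pre_ places no row condition), and every pairwise
-- distance must lie inside the histogram's range (otherwise A's dist[d] raises IndexError).
def Pre_do_logic (n : Int) (m : Int) (houses : List (List Int)) : Prop :=
  (2 ≤ houses.length → ∀ h ∈ houses, 2 ≤ h.length) ∧
  (∀ pq ∈ pvAllPairs houses, pvDistP (pvProj pq.1) (pvProj pq.2) < n + m)
instance (n : Int) (m : Int) (houses : List (List Int)) : Decidable (Pre_do_logic n m houses) := by
  unfold Pre_do_logic; infer_instance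

def pvWitness_do_logic : Int × Int × List (List Int) := (2, 2, [[0, 0], [1, 1]])

def Spec_do_logic (n : Int) (m : Int) (houses : List (List Int)) (out : List Int) : Prop := out = do_logic_alt n m houses
instance (n : Int) (m : Int) (houses : List (List Int)) (out : List Int) : Decidable (Spec_do_logic n m houses out) := by unfold Spec_do_logic; infer_instance

-- ===== CLAIM (what is proved, stated in full; the proofs are below) =====
def Claim_equal_do_logic : Prop := ∀ (n : Int) (m : Int) (houses : List (List Int)), Dom_do_logic n m houses → Pre_do_logic n m houses → Spec_do_logic n m houses (do_logic n m houses)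

-- ===== LEMMAS AND PROOFS =====

-- the histogram-bump step both loops perform, and its iteration over (index, weight) lists
def pvBump (dist : List Int) (d w : Int) : List Int :=
  PySem.List.pySetD dist d (PySem.List.pyGetD dist d 0 + w)
def pvBumps (ws : List (Int × Int)) (init : List Int) : List Int :=
  ws.foldl (fun dist p => pvBump dist p.1 p.2) init
-- the (index, weight) lists the two programs' loops produce
def pvWsA (houses : List (List Int)) : List (Int × Int) :=
  (pvAllPairs houses).map (fun pq => (pvDistP (pvProj pq.1) (pvProj pq.2), 1))
def pvWsB : List ((Int × Int) × Int) → List (Int × Int)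
  | [] => []
  | x :: r => (if 1 < x.2 then [((0 : Int), PySem.Int.floordiv (x.2 * (x.2 - 1)) 2)] else []) ++
      r.map (fun y => (pvDistP x.1 y.1, x.2 * y.2)) ++ pvWsB r
-- filtered weighted sum of a bump list at one bucket
def pvS (ws : List (Int × Int)) (t : Nat) : Int :=
  ((ws.filter (fun p => p.1 == (t : Int))).map (·.2)).sum

theorem pvDistP_comm (p q : Int × Int) : pvDistP p q = pvDistP q p := by
  simp [pvDistP, abs_sub_comm]
theorem pvDistP_self (p : Int × Int) : pvDistP p p = 0 := by simp [pvDistP]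
theorem pvDistP_nonneg (p q : Int × Int) : 0 ≤ pvDistP p q := by
  have := abs_nonneg (p.1 - q.1); have := abs_nonneg (p.2 - q.2)
  unfold pvDistP; omega

theorem pvAllPairs_map {α β : Type} (f : α → β) (l : List α) :
    pvAllPairs (l.map f) = (pvAllPairs l).map (Prod.map f f) := by
  induction l with
  | nil => rfl
  | cons x r ih => simp only [List.map_cons, pvAllPairs, ih, List.map_map, List.map_append]; rfl

theorem pvMem_allPairs {α : Type} {l : List α} {pq : α × α} (h : pq ∈ pvAllPairs l) :
    pq.1 ∈ l ∧ pq.2 ∈ l := by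
  induction l with
  | nil => simp [pvAllPairs] at h
  | cons x r ih =>
    simp only [pvAllPairs, List.mem_append, List.mem_map] at h
    rcases h with ⟨y, hy, rfl⟩ | h
    · exact ⟨by simp, by simp [hy]⟩
    · obtain ⟨h1, h2⟩ := ih h
      exact ⟨List.mem_cons_of_mem _ h1, List.mem_cons_of_mem _ h2⟩

theorem pvAllPairs_ne {α : Type} {l : List α} (hnd : l.Nodup) {pq : α × α}
    (h : pq ∈ pvAllPairs l) : pq.1 ≠ pq.2 := by
  induction l with
  | nil => simp [pvAllPairs] at h
  | cons x r ih =>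
    simp only [pvAllPairs, List.mem_append, List.mem_map] at h
    rcases h with ⟨y, hy, rfl⟩ | h
    · intro he
      simp only at he
      exact (List.nodup_cons.mp hnd).1 (he ▸ hy)
    · exact ih (List.nodup_cons.mp hnd).2 h

theorem pvMem_allPairs_of {α : Type} {l : List α} {p q : α} (hp : p ∈ l) (hq : q ∈ l)
    (hne : p ≠ q) : (p, q) ∈ pvAllPairs l ∨ (q, p) ∈ pvAllPairs l := by
  induction l with
  | nil => simp at hp
  | cons x r ih =>
    simp only [pvAllPairs, List.mem_append, List.mem_map]
    rcases List.mem_cons.mp hp with rfl | hp'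
    · left; left; exact ⟨q, by rcases List.mem_cons.mp hq with rfl | h; exact absurd rfl hne; exact h, rfl⟩
    · rcases List.mem_cons.mp hq with rfl | hq'
      · right; left; exact ⟨p, hp', rfl⟩
      · rcases ih hp' hq' with h | h
        · left; right; exact h
        · right; right; exact h

theorem pvMem_allPairs_count {α : Type} [BEq α] [LawfulBEq α] {l : List α} {x : α}
    (h : 1 < l.count x) : (x, x) ∈ pvAllPairs l := by
  induction l with
  | nil => simp at h
  | cons y r ih =>
    simp only [pvAllPairs, List.mem_append, List.mem_map]
    rw [List.count_cons] at h
    by_cases hxy : x = y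
    · subst hxy
      simp only [BEq.refl, if_pos] at h
      have : 0 < r.count x := by omega
      exact Or.inl ⟨x, List.count_pos_iff.mp this, rfl⟩
    · rw [if_neg (by simp only [beq_iff_eq]; intro hc; exact hxy hc.symm)] at h
      exact Or.inr (ih (by omega))

-- ===== sums =====
theorem pvS_append (w1 w2 : List (Int × Int)) (t : Nat) :
    pvS (w1 ++ w2) t = pvS w1 t + pvS w2 t := by
  simp [pvS, List.filter_append]

theorem pvS_map {α : Type} (l : List α) (f : α → Int × Int) (t : Nat) :
    pvS (l.map f) t = (l.map (fun a => if (f a).1 = (t : Int) then (f a).2 else 0)).sum := by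
  induction l with
  | nil => simp [pvS]
  | cons x r ih =>
    by_cases h : (f x).1 = (t : Int) <;>
      simp [pvS, h] at ih ⊢ <;> omega

theorem pvS_wsB (l : List ((Int × Int) × Int)) (t : Nat) :
    pvS (pvWsB l) t =
      (l.map (fun x => if (0 : Int) = (t : Int) ∧ 1 < x.2
          then PySem.Int.floordiv (x.2 * (x.2 - 1)) 2 else 0)).sum +
      ((pvAllPairs l).map (fun pq =>
          if pvDistP pq.1.1 pq.2.1 = (t : Int) then pq.1.2 * pq.2.2 else 0)).sum := by
  induction l with
  | nil => simp [pvWsB, pvS, pvAllPairs]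
  | cons x r ih =>
    have hself : pvS (if 1 < x.2 then [((0 : Int), PySem.Int.floordiv (x.2 * (x.2 - 1)) 2)] else []) t
        = if (0 : Int) = (t : Int) ∧ 1 < x.2 then PySem.Int.floordiv (x.2 * (x.2 - 1)) 2 else 0 := by
      by_cases hx : 1 < x.2 <;> by_cases h0 : (0 : Int) = (t : Int) <;>
        simp [hx, h0, pvS]
    have hcross : pvS (r.map (fun y => (pvDistP x.1 y.1, x.2 * y.2))) t
        = ((r.map (fun y => (x, y))).map (fun pq =>
            if pvDistP pq.1.1 pq.2.1 = (t : Int) then pq.1.2 * pq.2.2 else 0)).sum := by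
      rw [pvS_map, List.map_map]
      rfl
    show pvS ((if 1 < x.2 then [((0 : Int), PySem.Int.floordiv (x.2 * (x.2 - 1)) 2)] else []) ++
        r.map (fun y => (pvDistP x.1 y.1, x.2 * y.2)) ++ pvWsB r) t = _
    rw [pvS_append, pvS_append, hself, hcross, ih]
    show _ = _ + (((r.map (fun y => (x, y)) ++ pvAllPairs r)).map (fun pq =>
        if pvDistP pq.1.1 pq.2.1 = (t : Int) then pq.1.2 * pq.2.2 else 0)).sum
    rw [List.map_cons, List.sum_cons, List.map_append, List.sum_append]
    ring

-- sum over a Nodup list of a single spike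
theorem pvSpike_sum {α : Type} [DecidableEq α] (u : List α) (hu : u.Nodup) (x : α) (hx : x ∈ u)
    (g : α → Int) : (u.map (fun p => if p = x then g p else 0)).sum = g x := by
  induction u with
  | nil => simp at hx
  | cons y r ih =>
    obtain ⟨hy, hr⟩ := List.nodup_cons.mp hu
    rw [List.map_cons, List.sum_cons]
    by_cases hxy : y = x
    · rw [if_pos hxy]
      have hz : ∀ p ∈ r, (if p = x then g p else 0) = 0 := by
        intro p hp
        refine if_neg (fun hc : p = x => hy ?_)
        rw [hxy, ← hc]; exact hp
      rw [List.map_congr_left hz, hxy]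
      simp
    · have hx' : x ∈ r := by
        rcases List.mem_cons.mp hx with h | h
        · exact absurd h.symm hxy
        · exact h
      rw [ih hr hx', if_neg hxy]
      ring

-- L2: sum over a list = count-weighted sum over a covering Nodup list
theorem pvCount_sum {α : Type} [BEq α] [LawfulBEq α] [DecidableEq α] (u : List α) (hu : u.Nodup) (l : List α)
    (hl : ∀ a ∈ l, a ∈ u) (g : α → Int) :
    (l.map g).sum = (u.map (fun p => (l.count p : Int) * g p)).sum := by
  induction l with
  | nil => simp
  | cons x r ih =>
    have hx := hl x List.mem_cons_self
    have hr : ∀ a ∈ r, a ∈ u := fun a ha => hl a (List.mem_cons_of_mem _ ha)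
    simp only [List.map_cons, List.sum_cons, ih hr]
    have hstep : ∀ p ∈ u, ((x :: r).count p : Int) * g p
        = (r.count p : Int) * g p + (if p = x then g p else 0) := by
      intro p hp
      rw [List.count_cons]
      by_cases h : p = x
      · rw [if_pos (by simp only [beq_iff_eq]; exact h.symm), if_pos h, h]; push_cast; ring
      · rw [if_neg (by simp only [beq_iff_eq]; intro hc; exact h hc.symm), if_neg h]
        push_cast; ring
    rw [List.map_congr_left hstep, PySem.List.sum_map_add_int, pvSpike_sum u hu x hx]
    ring

-- L1: symmetric pair sum
theorem pvSym_sum {α : Type} (l : List α) (G : α → α → Int) (hsym : ∀ a b, G a b = G b a) :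
    2 * ((pvAllPairs l).map (fun pq => G pq.1 pq.2)).sum
      = (l.map (fun a => (l.map (fun b => G a b)).sum)).sum - (l.map (fun a => G a a)).sum := by
  induction l with
  | nil => simp [pvAllPairs]
  | cons x r ih =>
    show 2 * (((r.map (fun y => (x, y)) ++ pvAllPairs r)).map (fun pq => G pq.1 pq.2)).sum = _
    simp only [List.map_append, List.sum_append, List.map_map, List.map_cons, List.sum_cons,
      Function.comp_def]
    rw [PySem.List.sum_map_add_int r (fun a => G a x) (fun a => (r.map (fun b => G a b)).sum)]
    have h1 : (r.map (fun a => G a x)).sum = (r.map (fun b => G x b)).sum :=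
      congrArg _ (List.map_congr_left (fun a _ => hsym a x))
    rw [h1]
    omega


theorem range_map_getD (xs : List Int) :
    (List.range xs.length).map (fun t => xs.getD t 0) = xs := by
  apply List.ext_getElem
  · simp
  · intro i h1 h2
    simp [List.getElem?_eq_getElem h2]
theorem pvBump_length (dist : List Int) (d w : Int) : (pvBump dist d w).length = dist.length := by
  simp [pvBump, PySem.List.length_pySetD]
theorem pvBump_getD (dist : List Int) (d w : Int) (t : Nat) (h0 : 0 ≤ d)
    (h1 : d < (dist.length : Int)) :
    (pvBump dist d w).getD t 0 = if (t : Int) = d then dist.getD t 0 + w else dist.getD t 0 := by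
  unfold pvBump
  rw [PySem.List.pySetD_of_nonneg _ _ h0, PySem.List.pyGetD_eq_getElem _ _ h0 h1]
  rcases Nat.lt_or_ge t dist.length with ht | ht
  · rw [List.getD_eq_getElem _ _ (by simpa using ht), List.getElem_set,
      List.getD_eq_getElem _ _ ht]
    by_cases he : (t : Int) = d
    · simp [he, show d.toNat = t by omega]
    · simp [show ¬ d.toNat = t by omega, he]
  · rw [List.getD_eq_default _ _ (by simpa using ht), List.getD_eq_default _ _ ht]
    have : ¬ (t : Int) = d := by omega
    simp [this]
theorem pvS_cons (p : Int × Int) (ws : List (Int × Int)) (t : Nat) :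
    pvS (p :: ws) t = (if p.1 = (t : Int) then p.2 else 0) + pvS ws t := by
  by_cases h : p.1 = (t : Int) <;> simp [pvS, h]
theorem pvBumps_get (ws : List (Int × Int)) (init : List Int)
    (h : ∀ p ∈ ws, 0 ≤ p.1 ∧ p.1 < (init.length : Int)) :
    pvBumps ws init =
      (List.range init.length).map (fun t => init.getD t 0 + pvS ws t) := by
  induction ws generalizing init with
  | nil =>
    simpa [pvBumps, pvS] using (range_map_getD init).symm
  | cons p ws ih =>
    obtain ⟨h0, h1⟩ := h p List.mem_cons_self
    have hlen : (pvBump init p.1 p.2).length = init.length := pvBump_length ..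
    have : pvBumps (p :: ws) init = pvBumps ws (pvBump init p.1 p.2) := rfl
    rw [this, ih _ (by intro q hq; rw [hlen]; exact h q (List.mem_cons_of_mem _ hq)), hlen]
    apply List.map_congr_left
    intro t ht
    have ht' : t < init.length := List.mem_range.mp ht
    rw [pvBump_getD _ _ _ _ h0 h1, pvS_cons]
    by_cases he : (t : Int) = p.1
    · rw [if_pos he, if_pos he.symm]; ring
    · have : ¬ p.1 = (t : Int) := fun hc => he hc.symm
      rw [if_neg he, if_neg this, zero_add]

theorem pvTwoFdiv (c : Int) (hc : 1 ≤ c) :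
    2 * (if 1 < c then PySem.Int.floordiv (c * (c - 1)) 2 else 0) = c * c - c := by
  by_cases h1 : 1 < c
  · rw [if_pos h1]
    have hev : Even ((c - 1) * ((c - 1) + 1)) := Int.even_mul_succ_self (c - 1)
    have hdvd : (2 : Int) ∣ c * (c - 1) := by
      rcases hev with ⟨k, hk⟩
      exact ⟨k, by linarith⟩
    have hm : PySem.Int.mod (c * (c - 1)) 2 = 0 :=
      (PySem.Int.mod_eq_zero_iff_dvd _ _).mpr hdvd
    have hfm := PySem.Int.floordiv_mul_add_mod (c * (c - 1)) 2
    rw [hm] at hfm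
    nlinarith [hfm]
  · have : c = 1 := by omega
    simp [this]

theorem pvS_eq (t : Nat) (houses : List (List Int)) :
    pvS (pvWsA houses) t
      = pvS (pvWsB ((PySem.Dict.counter (houses.map pvProj)).items)) t := by
  set ps := houses.map pvProj with hps
  set u := PySem.Set.ofList ps with hu_def
  have hu : u.Nodup := PySem.Set.nodup_ofList ps
  have hl : ∀ a ∈ ps, a ∈ u := fun a ha => (PySem.Set.mem_ofList ps a).mpr ha
  set c : Int × Int → Int := fun p => (ps.count p : Int) with hc_def
  have hc1 : ∀ p ∈ u, 1 ≤ c p := by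
    intro p hp
    have : p ∈ ps := (PySem.Set.mem_ofList ps p).mp hp
    have := List.count_pos_iff.mpr this
    simp only [hc_def]; omega
  set G : Int × Int → Int × Int → Int := fun a b => if pvDistP a b = (t : Int) then 1 else 0
    with hG_def
  have hGsym : ∀ a b, G a b = G b a := by
    intro a b; simp only [hG_def, pvDistP_comm a b]
  set Gc : Int × Int → Int × Int → Int :=
    fun a b => if pvDistP a b = (t : Int) then c a * c b else 0 with hGc_def
  have hGcsym : ∀ a b, Gc a b = Gc b a := by
    intro a b; simp only [hGc_def, pvDistP_comm a b, mul_comm]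
  -- A side
  have hSA : pvS (pvWsA houses) t = ((pvAllPairs ps).map (fun pq => G pq.1 pq.2)).sum := by
    rw [pvWsA, pvS_map, hps, pvAllPairs_map, List.map_map]
    rfl
  -- B side
  rw [PySem.Dict.items_counter]
  have hSB : pvS (pvWsB ((PySem.Set.ofList (houses.map pvProj)).map
        (fun k => (k, ((houses.map pvProj).count k : Int))))) t
      = (u.map (fun p => if (0 : Int) = (t : Int) ∧ 1 < c p
            then PySem.Int.floordiv (c p * (c p - 1)) 2 else 0)).sum
        + ((pvAllPairs u).map (fun pq => Gc pq.1 pq.2)).sum := by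
    rw [pvS_wsB, pvAllPairs_map, List.map_map, List.map_map]
    rfl
  rw [hSA, hSB]
  -- symmetric decompositions
  have eA := pvSym_sum ps G hGsym
  have eU := pvSym_sum u Gc hGcsym
  -- full sums agree
  have eFull : (ps.map (fun a => (ps.map (fun b => G a b)).sum)).sum
      = (u.map (fun p => (u.map (fun q => Gc p q)).sum)).sum := by
    rw [pvCount_sum u hu ps hl]
    apply congrArg
    apply List.map_congr_left
    intro p hp
    rw [pvCount_sum u hu ps hl (fun b => G p b), ← List.sum_map_mul_left]
    apply congrArg
    apply List.map_congr_left
    intro q hq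
    simp only [hGc_def, hG_def]
    by_cases h : pvDistP p q = (t : Int) <;> simp [h, hc_def]
  by_cases h0 : (0 : Int) = (t : Int)
  · -- t = 0 bucket
    have hdiagA : (ps.map (fun a => G a a)).sum = (ps.length : Int) := by
      have : ∀ a ∈ ps, G a a = 1 := by
        intro a _; simp only [hG_def, pvDistP_self, ← h0, if_true]
      rw [List.map_congr_left this]
      simp
    have hdiagU : (u.map (fun p => Gc p p)).sum = (u.map (fun p => c p * c p)).sum := by
      apply congrArg; apply List.map_congr_left
      intro p _
      simp only [hGc_def, pvDistP_self, ← h0, if_true]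
    have hl1 : (ps.map (fun _ => (1 : Int))).sum = (ps.length : Int) := by
      induction ps with
      | nil => simp
      | cons a r ih => simp only [List.map_cons, List.sum_cons, ih, List.length_cons]; push_cast; ring
    have hlen : (ps.length : Int) = (u.map (fun p => c p * 1)).sum := by
      rw [← hl1, hc_def]
      simpa using pvCount_sum u hu ps hl (fun _ => 1)
    have hself2 : (u.map (fun p => 2 * (if (0 : Int) = (t : Int) ∧ 1 < c p
          then PySem.Int.floordiv (c p * (c p - 1)) 2 else 0))).sum
        = (u.map (fun p => c p * c p - c p)).sum := by
      apply congrArg; apply List.map_congr_left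
      intro p hp
      have h1 := hc1 p hp
      simp only [← h0, true_and]
      exact pvTwoFdiv (c p) h1
    have hmul2 : ∀ (l : List (Int × Int)) (f : (Int × Int) → Int),
        (l.map (fun p => 2 * f p)).sum = 2 * (l.map f).sum := by
      intro l f; rw [← List.sum_map_mul_left]
    rw [hmul2] at hself2
    have hsub : (u.map (fun p => c p * c p - c p)).sum
        = (u.map (fun p => c p * c p)).sum - (u.map (fun p => c p * 1)).sum := by
      have : ∀ p ∈ u, c p * c p - c p = c p * c p + (-(c p * 1)) := by
        intro p _; ring
      rw [List.map_congr_left this, PySem.List.sum_map_add_int]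
      have : ((u.map (fun p => -(c p * 1))).sum) = -((u.map (fun p => c p * 1)).sum) := by
        induction u with
        | nil => simp
        | cons a r ih => simp only [List.map_cons, List.sum_cons, ih]; ring
      rw [this]; ring
    rw [hsub] at hself2
    omega
  · -- other buckets
    have hdiagA : (ps.map (fun a => G a a)).sum = 0 := by
      have : ∀ a ∈ ps, G a a = 0 := by
        intro a _; simp only [hG_def, pvDistP_self]; rw [if_neg h0]
      rw [List.map_congr_left this]; simp
    have hdiagU : (u.map (fun p => Gc p p)).sum = 0 := by
      have : ∀ p ∈ u, Gc p p = 0 := by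
        intro p _; simp only [hGc_def, pvDistP_self]; rw [if_neg h0]
      rw [List.map_congr_left this]; simp
    have hself : (u.map (fun p => if (0 : Int) = (t : Int) ∧ 1 < c p
          then PySem.Int.floordiv (c p * (c p - 1)) 2 else 0)).sum = 0 := by
      have : ∀ p ∈ u, (if (0 : Int) = (t : Int) ∧ 1 < c p
          then PySem.Int.floordiv (c p * (c p - 1)) 2 else 0) = 0 := by
        intro p _; rw [if_neg (fun hc => h0 hc.1)]
      rw [List.map_congr_left this]; simp
    omega

theorem pvHmem (n m : Int) (houses : List (List Int))
    (hPre : ∀ pq ∈ pvAllPairs houses, pvDistP (pvProj pq.1) (pvProj pq.2) < n + m) :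
    ∀ pq ∈ pvAllPairs (houses.map pvProj), pvDistP pq.1 pq.2 < n + m := by
    intro pq hpq
    rw [pvAllPairs_map] at hpq
    obtain ⟨pq', hpq', heq⟩ := List.mem_map.mp hpq
    have h := hPre pq' hpq'
    have h1 : pq.1 = pvProj pq'.1 := by rw [← heq]; rfl
    have h2 : pq.2 = pvProj pq'.2 := by rw [← heq]; rfl
    rw [h1, h2]; exact h

theorem pvMem_wsB {l : List ((Int × Int) × Int)} {p : Int × Int} (h : p ∈ pvWsB l) :
    (p.1 = 0 ∧ ∃ x ∈ l, 1 < x.2) ∨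
    ∃ pq ∈ pvAllPairs l, p.1 = pvDistP pq.1.1 pq.2.1 := by
  induction l with
  | nil => simp [pvWsB] at h
  | cons x r ih =>
    simp only [pvWsB, List.mem_append, List.mem_map] at h
    rcases h with (h | ⟨y, hy, rfl⟩) | h
    · left
      by_cases hx : 1 < x.2
      · rw [if_pos hx] at h
        simp at h
        exact ⟨by rw [h], x, List.mem_cons_self, hx⟩
      · rw [if_neg hx] at h; simp at h
    · right
      refine ⟨(x, y), ?_, rfl⟩
      show (x, y) ∈ r.map (fun y => (x, y)) ++ pvAllPairs r
      exact List.mem_append_left _ (List.mem_map_of_mem hy)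
    · rcases ih h with ⟨h1, x', hx', h2⟩ | ⟨pq, hpq, h2⟩
      · exact Or.inl ⟨h1, x', List.mem_cons_of_mem _ hx', h2⟩
      · refine Or.inr ⟨pq, ?_, h2⟩
        show pq ∈ r.map (fun y => (x, y)) ++ pvAllPairs r
        exact List.mem_append_right _ hpq


theorem pvDist_lt (n m : Int) (houses : List (List Int))
    (hPre : ∀ pq ∈ pvAllPairs houses, pvDistP (pvProj pq.1) (pvProj pq.2) < n + m)
    {a b : Int × Int} (ha : a ∈ houses.map pvProj) (hb : b ∈ houses.map pvProj)
    (hab : a ≠ b ∨ 1 < (houses.map pvProj).count a) :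
    pvDistP a b < n + m := by
  have hmem := pvHmem n m houses hPre
  rcases hab with hne | hcnt
  · rcases pvMem_allPairs_of ha hb hne with h | h
    · exact hmem (a, b) h
    · rw [pvDistP_comm]; exact hmem (b, a) h
  · by_cases hne : a = b
    · subst hne
      exact hmem (a, a) (pvMem_allPairs_count hcnt)
    · rcases pvMem_allPairs_of ha hb hne with h | h
      · exact hmem (a, b) h
      · rw [pvDistP_comm]; exact hmem (b, a) h

theorem pvBumps_append (w1 w2 : List (Int × Int)) (init : List Int) :
    pvBumps (w1 ++ w2) init = pvBumps w2 (pvBumps w1 init) := by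
  simp [pvBumps, List.foldl_append]

theorem lemA (houses : List (List Int)) (suf : List (List Int)) :
    ∀ (pre : List (List Int)) (acc : List Int), houses = pre ++ suf →
    (PySem.List.pyRange (pre.length : Int) ((houses.length : Int)) 1).foldl (fun dist i =>
      let h1 := PySem.List.pyGetD houses i []
      (PySem.List.pyRange (i + 1) ((houses.length : Int)) 1).foldl (fun dist j =>
        let h2 := PySem.List.pyGetD houses j []
        let d := |PySem.List.pyGetD h1 0 0 - PySem.List.pyGetD h2 0 0| +
                 |PySem.List.pyGetD h1 1 0 - PySem.List.pyGetD h2 1 0|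
        PySem.List.pySetD dist d (PySem.List.pyGetD dist d 0 + 1)) dist) acc
    = pvBumps (pvWsA suf) acc := by
  induction suf with
  | nil =>
    intro pre acc hh
    rw [PySem.List.pyRange_one_eq_nil (by simp [hh])]
    simp [pvWsA, pvAllPairs, pvBumps]
  | cons x r ih =>
    intro pre acc hh
    have hlen : houses.length = pre.length + r.length + 1 := by rw [hh]; simp; omega
    have hlt : (pre.length : Int) < (houses.length : Int) := by omega
    rw [PySem.List.pyRange_one_cons hlt, List.foldl_cons]
    have hget : PySem.List.pyGetD houses (pre.length : Int) [] = x := by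
      rw [PySem.List.pyGetD_natCast, hh, List.getD_eq_getElem _ _ (by simp)]
      simp
    have hdrop : houses.drop ((pre.length : Int) + 1).toNat = r := by
      rw [hh, show ((pre.length : Int) + 1).toNat = pre.length + 1 by omega,
        show pre.length + 1 = (pre ++ [x]).length by simp,
        show pre ++ x :: r = (pre ++ [x]) ++ r by simp]
      exact List.drop_left
    have hinner : ∀ acc2 : List Int,
        (PySem.List.pyRange ((pre.length : Int) + 1) ((houses.length : Int)) 1).foldl
          (fun dist j =>
            let h2 := PySem.List.pyGetD houses j []
            let d := |PySem.List.pyGetD x 0 0 - PySem.List.pyGetD h2 0 0| +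
                     |PySem.List.pyGetD x 1 0 - PySem.List.pyGetD h2 1 0|
            PySem.List.pySetD dist d (PySem.List.pyGetD dist d 0 + 1)) acc2
        = pvBumps (r.map (fun y => (pvDistP (pvProj x) (pvProj y), 1))) acc2 := by
      intro acc2
      have h1 := PySem.List.foldl_pyRange_pyGetD' houses ([] : List Int)
        (fun dist h2 =>
          PySem.List.pySetD dist
            (|PySem.List.pyGetD x 0 0 - PySem.List.pyGetD h2 0 0| +
             |PySem.List.pyGetD x 1 0 - PySem.List.pyGetD h2 1 0|)
            (PySem.List.pyGetD dist
              (|PySem.List.pyGetD x 0 0 - PySem.List.pyGetD h2 0 0| +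
               |PySem.List.pyGetD x 1 0 - PySem.List.pyGetD h2 1 0|) 0 + 1))
        acc2 (a := (pre.length : Int) + 1) (by omega)
      rw [hdrop] at h1
      exact h1.trans (by rw [pvBumps, List.foldl_map]; rfl)
    rw [hget, hinner]
    have hih := ih (pre ++ [x]) (pvBumps (r.map (fun y => (pvDistP (pvProj x) (pvProj y), 1))) acc)
      (by rw [hh]; simp)
    rw [show ((pre ++ [x]).length : Int) = (pre.length : Int) + 1 by simp] at hih
    rw [hih]
    simp only [pvWsA, pvAllPairs]
    rw [List.map_append, pvBumps_append, List.map_map]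
    rfl

theorem lemB (pts : List ((Int × Int) × Int)) (suf : List ((Int × Int) × Int)) :
    ∀ (pre : List ((Int × Int) × Int)) (acc : List Int), pts = pre ++ suf →
    (PySem.List.enumerate suf (pre.length : Int)).foldl (fun dist e =>
      let dist := if 1 < e.2.2 then
          PySem.List.pySetD dist 0 (PySem.List.pyGetD dist 0 0 +
            PySem.Int.floordiv (e.2.2 * (e.2.2 - 1)) 2)
        else dist
      (PySem.List.slice pts (some (e.1 + 1)) none).foldl (fun dist q =>
        let d := |e.2.1.1 - q.1.1| + |e.2.1.2 - q.1.2|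
        PySem.List.pySetD dist d (PySem.List.pyGetD dist d 0 + e.2.2 * q.2)) dist) acc
    = pvBumps (pvWsB suf) acc := by
  induction suf with
  | nil =>
    intro pre acc hh
    simp [PySem.List.enumerate_nil, pvWsB, pvBumps]
  | cons x r ih =>
    intro pre acc hh
    rw [PySem.List.enumerate_cons, List.foldl_cons]
    have hslice : PySem.List.slice pts (some ((pre.length : Int) + 1)) none = r := by
      rw [PySem.List.slice_from _ (by omega),
        show ((pre.length : Int) + 1).toNat = (pre ++ [x]).length by simp,
        hh, show pre ++ x :: r = (pre ++ [x]) ++ r by simp]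
      exact List.drop_left
    have hself : ∀ dist : List Int,
        (if 1 < x.2 then
          PySem.List.pySetD dist 0 (PySem.List.pyGetD dist 0 0 +
            PySem.Int.floordiv (x.2 * (x.2 - 1)) 2)
        else dist)
        = pvBumps (if 1 < x.2 then [((0 : Int), PySem.Int.floordiv (x.2 * (x.2 - 1)) 2)] else []) dist := by
      intro dist
      by_cases hx : 1 < x.2 <;> simp [hx, pvBumps, pvBump]
    have hinner : ∀ acc2 : List Int,
        r.foldl (fun dist q =>
          let d := |x.1.1 - q.1.1| + |x.1.2 - q.1.2|
          PySem.List.pySetD dist d (PySem.List.pyGetD dist d 0 + x.2 * q.2)) acc2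
        = pvBumps (r.map (fun y => (pvDistP x.1 y.1, x.2 * y.2))) acc2 := by
      intro acc2
      rw [pvBumps, List.foldl_map]
      rfl
    simp only [hslice, hself, hinner]
    have hih := ih (pre ++ [x])
      (pvBumps (r.map (fun y => (pvDistP x.1 y.1, x.2 * y.2)))
        (pvBumps (if 1 < x.2 then [((0 : Int), PySem.Int.floordiv (x.2 * (x.2 - 1)) 2)] else []) acc))
      (by rw [hh]; simp)
    rw [show ((pre ++ [x]).length : Int) = (pre.length : Int) + 1 by simp] at hih
    rw [hih]
    simp only [pvWsB]
    rw [pvBumps_append, pvBumps_append]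

theorem do_logic_eq_bumps (n m : Int) (houses : List (List Int)) :
    do_logic n m houses = pvBumps (pvWsA houses) (List.replicate (n + m).toNat 0) := by
  unfold do_logic
  rw [PySem.List.pyRepeat_singleton]
  exact lemA houses houses [] _ rfl

theorem do_logic_alt_eq_bumps (n m : Int) (houses : List (List Int))
    (h2 : ¬ ((houses.length : Int) < 2)) :
    do_logic_alt n m houses =
      pvBumps (pvWsB ((PySem.Dict.counter (houses.map pvProj)).items))
        (List.replicate (n + m).toNat 0) := by
  unfold do_logic_alt
  rw [if_neg h2, PySem.List.pyRepeat_singleton]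
  have hc : houses.foldl (fun cnt h =>
      cnt.insert (PySem.List.pyGetD h 0 0, PySem.List.pyGetD h 1 0)
        (cnt.getD (PySem.List.pyGetD h 0 0, PySem.List.pyGetD h 1 0) 0 + 1)) PySem.Dict.empty
      = PySem.Dict.counter (houses.map pvProj) := by
    rw [← PySem.Dict.foldl_insert_getD_add_one_eq_counter, List.foldl_map]
    rfl
  rw [hc]
  exact lemB _ _ [] _ rfl

-- with fewer than two houses there are no pairs, so A leaves the histogram untouched
theorem pvWsA_short (houses : List (List Int)) (h : houses.length < 2) :
    pvWsA houses = [] := by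
  match houses, h with
  | [], _ => rfl
  | [x], _ => rfl

theorem pv_main (n m : Int) (houses : List (List Int)) (h2 : 2 ≤ houses.length)
    (hPre2 : ∀ pq ∈ pvAllPairs houses, pvDistP (pvProj pq.1) (pvProj pq.2) < n + m) :
    do_logic n m houses = do_logic_alt n m houses := by
  rw [do_logic_eq_bumps, do_logic_alt_eq_bumps _ _ _ (by exact_mod_cast not_lt.mpr (by exact_mod_cast h2))]
  have htoNat : n + m ≤ ((n + m).toNat : Int) := Int.self_le_toNat (n + m)
  have hlen : ((List.replicate (n + m).toNat (0 : Int)).length : Int) = ((n + m).toNat : Int) := by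
    simp
  have hA : ∀ p ∈ pvWsA houses,
      0 ≤ p.1 ∧ p.1 < ((List.replicate (n + m).toNat (0 : Int)).length : Int) := by
    intro p hp
    obtain ⟨pq, hpq, rfl⟩ := List.mem_map.mp hp
    refine ⟨pvDistP_nonneg _ _, ?_⟩
    rw [hlen]
    have h1 := hPre2 pq hpq
    omega
  have hB : ∀ p ∈ pvWsB ((PySem.Dict.counter (houses.map pvProj)).items),
      0 ≤ p.1 ∧ p.1 < ((List.replicate (n + m).toNat (0 : Int)).length : Int) := by
    intro p hp
    rw [PySem.Dict.items_counter] at hp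
    rcases pvMem_wsB hp with ⟨h0, x, hx, hx2⟩ | ⟨pq, hpq, hd⟩
    · obtain ⟨k, hk, rfl⟩ := List.mem_map.mp hx
      simp only at hx2
      have hk' : k ∈ houses.map pvProj := (PySem.Set.mem_ofList _ _).mp hk
      have hcnt : 1 < (houses.map pvProj).count k := by exact_mod_cast hx2
      have hdl := pvDist_lt n m houses hPre2 hk' hk' (Or.inr hcnt)
      rw [pvDistP_self] at hdl
      exact ⟨by rw [h0], by rw [h0, hlen]; omega⟩
    · rw [pvAllPairs_map] at hpq
      obtain ⟨pq', hpq', rfl⟩ := List.mem_map.mp hpq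
      have hne := pvAllPairs_ne (PySem.Set.nodup_ofList _) hpq'
      obtain ⟨m1, m2⟩ := pvMem_allPairs hpq'
      have h1 : pq'.1 ∈ houses.map pvProj := (PySem.Set.mem_ofList _ _).mp m1
      have h2 : pq'.2 ∈ houses.map pvProj := (PySem.Set.mem_ofList _ _).mp m2
      have hdl := pvDist_lt n m houses hPre2 h1 h2 (Or.inl hne)
      have hd' : p.1 = pvDistP pq'.1 pq'.2 := hd
      refine ⟨by rw [hd']; exact pvDistP_nonneg _ _, by rw [hd', hlen]; omega⟩
  rw [pvBumps_get _ _ hA, pvBumps_get _ _ hB]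
  apply List.map_congr_left
  intro t _
  rw [pvS_eq]

-- ===== VERDICT (by name: the statement is the Claim_ definition above) =====
theorem do_logic_spec : Claim_equal_do_logic := by
  intro n m houses _ hPre
  unfold Spec_do_logic
  by_cases h2 : 2 ≤ houses.length
  · exact pv_main n m houses h2 hPre.2
  · have hlt : houses.length < 2 := by omega
    rw [do_logic_eq_bumps, pvWsA_short houses hlt]
    unfold do_logic_alt
    rw [if_pos (by exact_mod_cast hlt), PySem.List.pyRepeat_singleton]
    rfl
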